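-- pv_equiv track=rewrite | github.com/IBM/data-prep-lab | transforms/code/code_quality/src/code_quality_transform.py | is_autogenerated
-- ===== SOURCE A (Python) =====
-- def is_autogenerated(data, scan_width=5):
--     """
--     Check if file is autogenerated by looking for keywords in the first few lines of the file.
--     """
--     keywords = ["auto-generated", "autogenerated", "automatically generated"]
--     lines = data.splitlines()
--     for _, line in zip(range(scan_width), lines):
--         for keyword in keywords:
--             if keyword in line.lower():
--                 return True
--     else:
--         return False
-- ===== SOURCE B (Python) =====
-- def is_autogenerated(data, scan_width=5):
--     keywords = ["auto-generated", "autogenerated", "automatically generated"]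
--     lines = data.splitlines()
--     text = "\n".join(lines[:max(scan_width, 0)]).lower()
--     return any(keyword in text for keyword in keywords)
-- ===== Notes on version B (the rewrite author's own statement) =====
-- stated objective: idiomatic
-- what changed: B inverts the nesting: instead of A's per-line loop testing each keyword against each lowered line, B joins the first scan_width lines into one lowercased text and asks once per keyword whether it occurs in that blob (correct because no keyword spans a newline).
import Mathlib
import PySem

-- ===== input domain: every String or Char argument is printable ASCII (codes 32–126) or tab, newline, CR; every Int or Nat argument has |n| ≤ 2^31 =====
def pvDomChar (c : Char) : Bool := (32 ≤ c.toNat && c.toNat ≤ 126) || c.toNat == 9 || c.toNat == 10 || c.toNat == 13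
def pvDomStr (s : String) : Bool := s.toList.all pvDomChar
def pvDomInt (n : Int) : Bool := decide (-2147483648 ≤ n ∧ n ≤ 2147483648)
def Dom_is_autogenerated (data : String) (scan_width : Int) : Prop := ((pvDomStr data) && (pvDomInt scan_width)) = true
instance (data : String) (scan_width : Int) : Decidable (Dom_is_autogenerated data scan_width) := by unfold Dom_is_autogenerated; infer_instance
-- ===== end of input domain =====

-- B is a different decomposition: it joins the first scan_width lines into one lowercased
-- text and searches that blob once per keyword, instead of A's per-line per-keyword scan.
-- ===== PORT A =====
-- 'for _, line in zip(range(scan_width), lines)': Python's zip is LAZY, so it walks the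
-- lines with a counter i = 0,1,… and stops as soon as i reaches scan_width or the lines
-- run out; this recursion is that loop step for step (the inner for/early return is .any).
def pvScanLoop (keywords : List String) (scan_width : Int) (i : Int) :
    List String → Bool
  | [] => false
  | line :: rest =>
    if i < scan_width then
      (keywords.any (fun keyword => PySem.Str.isIn keyword (PySem.Str.lower line))
        || pvScanLoop keywords scan_width (i + 1) rest)
    else false

def is_autogenerated (data : String) (scan_width : Int) : Bool :=
  let keywords : List String := ["auto-generated", "autogenerated", "automatically generated"]
  let lines := PySem.Str.splitlines data
  pvScanLoop keywords scan_width 0 lines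

-- ===== PORT B =====
def is_autogenerated_alt (data : String) (scan_width : Int) : Bool :=
  let keywords : List String := ["auto-generated", "autogenerated", "automatically generated"]
  let lines := PySem.Str.splitlines data
  let text := PySem.Str.lower (PySem.Str.join "\n" (lines.take (max scan_width 0).toNat))
  keywords.any (fun keyword => PySem.Str.isIn keyword text)

-- ===== PRECONDITION & SPEC =====
def Spec_is_autogenerated (data : String) (scan_width : Int) (out : Bool) : Prop := out = is_autogenerated_alt data scan_width
instance (data : String) (scan_width : Int) (out : Bool) : Decidable (Spec_is_autogenerated data scan_width out) := by unfold Spec_is_autogenerated; infer_instance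

-- ===== CLAIM (what is proved, stated in full; the proofs are below) =====
def Claim_equal_is_autogenerated : Prop := ∀ (data : String) (scan_width : Int), Dom_is_autogenerated data scan_width → Spec_is_autogenerated data scan_width (is_autogenerated data scan_width)

-- ===== LEMMAS AND PROOFS =====

-- ===== VERDICT (by name: the statement is the Claim_ definition above) =====
-- A nonempty pattern that avoids a character c is a prefix of `a ++ c :: b` only within `a`.
lemma pv_prefix_sep {k a b : List Char} {c : Char} (hc : c ∉ k) (h : k <+: a ++ c :: b) :
    k <+: a := by
  induction a generalizing k with
  | nil =>
    cases k with
    | nil => exact List.nil_prefix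
    | cons x xs =>
      rw [List.nil_append, List.cons_prefix_cons] at h
      exact absurd (h.1 ▸ List.mem_cons_self) hc
  | cons y ys ih =>
    cases k with
    | nil => exact List.nil_prefix
    | cons x xs =>
      rw [List.cons_append, List.cons_prefix_cons] at h
      obtain ⟨rfl, h⟩ := h
      have hx : c ∉ xs := fun hm => hc (List.mem_cons_of_mem _ hm)
      exact List.cons_prefix_cons.mpr ⟨rfl, ih hx h⟩

-- A pattern avoiding the separator char lies entirely on one side of it.
lemma pv_infix_sep {k : List Char} (a b : List Char) {c : Char} (hc : c ∉ k) :
    k <:+: a ++ c :: b ↔ k <:+: a ∨ k <:+: b := by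
  constructor
  · intro h
    induction a generalizing k with
    | nil =>
      rcases List.infix_cons_iff.mp h with hp | hi
      · have := pv_prefix_sep (a := []) hc hp
        exact Or.inl this.isInfix
      · exact Or.inr hi
    | cons y ys ih =>
      rcases List.infix_cons_iff.mp h with hp | hi
      · exact Or.inl (pv_prefix_sep hc hp).isInfix
      · rcases ih hc hi with h1 | h2
        · exact Or.inl (h1.trans (List.infix_cons_iff.mpr (Or.inr (List.infix_refl ys))))
        · exact Or.inr h2
  · rintro (h | h)
    · exact h.trans ⟨[], c :: b, by simp⟩
    · exact h.trans ⟨a ++ [c], [], by simp⟩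

-- A nonempty pattern avoiding the separator is in the join iff it is in some part.
lemma pv_infix_join (k : List Char) (c : Char) (hk : k ≠ []) (hc : c ∉ k)
    (lss : List (List Char)) :
    k <:+: PySem.Chars.join [c] lss ↔ ∃ l ∈ lss, k <:+: l := by
  induction lss with
  | nil =>
    simp [PySem.Chars.join_nil]
    intro h
    exact hk h
  | cons l rest ih =>
    cases rest with
    | nil => simp [PySem.Chars.join_singleton]
    | cons m ms =>
      rw [PySem.Chars.join_cons_cons, List.append_assoc, List.singleton_append,
        pv_infix_sep _ _ hc, ih]
      simp

-- lower distributes over a join on a separator fixed by lowerChar.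
lemma pv_lower_join (c : Char) (hc : PySem.Chars.lowerChar c = c) (lss : List (List Char)) :
    PySem.Chars.lower (PySem.Chars.join [c] lss)
      = PySem.Chars.join [c] (lss.map PySem.Chars.lower) := by
  induction lss with
  | nil => simp [PySem.Chars.join_nil, PySem.Chars.lower]
  | cons l rest ih =>
    cases rest with
    | nil => simp [PySem.Chars.join_singleton]
    | cons m ms =>
      rw [PySem.Chars.join_cons_cons, List.map_cons, List.map_cons,
        PySem.Chars.join_cons_cons, List.map_cons.symm, ← ih]
      simp [PySem.Chars.lower, hc]

lemma pv_loop_eq (kws : List String) (w : Int) (ls : List String) (i : Int) :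
    pvScanLoop kws w i ls
      = (ls.take (w - i).toNat).any
          (fun line => kws.any (fun keyword => PySem.Str.isIn keyword (PySem.Str.lower line))) := by
  induction ls generalizing i with
  | nil => simp [pvScanLoop]
  | cons line rest ih =>
    by_cases h : i < w
    · have hn : (w - i).toNat = ((w - (i + 1)).toNat) + 1 := by omega
      rw [pvScanLoop, if_pos h, ih, hn, List.take_succ_cons, List.any_cons]
    · have hn : (w - i).toNat = 0 := by omega
      rw [pvScanLoop, if_neg h, hn, List.take_zero, List.any_nil]

set_option maxHeartbeats 1000000 in
-- membership of one keyword in the lowered join, reduced to the lines.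
lemma pv_isIn_join (k : String) (hk : k.toList ≠ []) (hc : '\n' ∉ k.toList)
    (ts : List String) :
    PySem.Str.isIn k (PySem.Str.lower (PySem.Str.join "\n" ts))
      = ts.any (fun t => PySem.Str.isIn k (PySem.Str.lower t)) := by
  rw [Bool.eq_iff_iff]
  rw [PySem.Str.isIn_iff_infix, PySem.Str.toList_lower, PySem.Str.toList_join]
  have hsep : ("\n" : String).toList = ['\n'] := rfl
  rw [hsep, pv_lower_join '\n' rfl, pv_infix_join _ _ hk hc]
  simp [List.any_eq_true, PySem.Chars.isIn_iff_infix, PySem.Str.toList_lower]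

set_option maxHeartbeats 1000000 in
theorem is_autogenerated_spec : Claim_equal_is_autogenerated := by
  intro data scan_width _
  unfold Spec_is_autogenerated is_autogenerated is_autogenerated_alt
  simp only
  rw [pv_loop_eq]
  have hz : (scan_width - 0).toNat = scan_width.toNat := by omega
  have hmax : (max scan_width 0).toNat = scan_width.toNat := by omega
  rw [hz, hmax]
  set ts := (PySem.Str.splitlines data).take scan_width.toNat with hts
  rw [List.any_cons, List.any_cons, List.any_cons, List.any_nil,
    pv_isIn_join _ (by decide) (by decide),
    pv_isIn_join _ (by decide) (by decide),
    pv_isIn_join _ (by decide) (by decide)]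
  rw [Bool.eq_iff_iff]
  simp only [List.any_eq_true, List.any_cons, List.any_nil, Bool.or_eq_true,
    Bool.false_eq_true, or_false]
  constructor
  · rintro ⟨t, ht, h | h | h⟩
    exacts [Or.inl ⟨t, ht, h⟩, Or.inr (Or.inl ⟨t, ht, h⟩), Or.inr (Or.inr ⟨t, ht, h⟩)]
  · rintro (⟨t, ht, h⟩ | ⟨t, ht, h⟩ | ⟨t, ht, h⟩)
    exacts [⟨t, ht, Or.inl h⟩, ⟨t, ht, Or.inr (Or.inl h)⟩, ⟨t, ht, Or.inr (Or.inr h)⟩]
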